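-- pv_equiv track=rewrite | github.com/joelbarmettlerUZH/md-reheader | src/md_reheader/eval/analysis.py | _is_lost_in_middle
-- ===== SOURCE A (Python) =====
-- def _is_lost_in_middle(pred: list[int], truth: list[int]) -> bool:
--     """Known failure mode: small models attend well to start/end but degrade in the middle."""
--     if len(pred) != len(truth) or len(pred) < 8:
--         return False
--     quarter = len(pred) // 4
--
--     start_acc = sum(p == t for p, t in zip(pred[:quarter], truth[:quarter])) / quarter
--     end_acc = sum(p == t for p, t in zip(pred[-quarter:], truth[-quarter:])) / quarter
--     mid_acc = sum(
--         p == t for p, t in zip(pred[quarter:-quarter], truth[quarter:-quarter])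
--     ) / (len(pred) - 2 * quarter)
--
--     return start_acc > 0.7 and end_acc > 0.7 and mid_acc < 0.4
-- ===== SOURCE B (Python) =====
-- def _is_lost_in_middle(pred: list[int], truth: list[int]) -> bool:
--     """Error-position approach: instead of measuring an accuracy per zone,
--     collect the (sorted) positions of all mismatches once, then read the three
--     zone error counts off that list — the start-zone errors are a prefix of it,
--     the end-zone errors a suffix (both found by early-exit scans that stop at
--     the first position leaving the zone), and the middle errors are whatever
--     remains.  The accuracy thresholds become exact integer error budgets:
--     acc > 0.7 over k items  <=>  errors*10 < 3*k, and
--     acc < 0.4 over d items  <=>  errors*10 > 6*d."""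
--     n = len(pred)
--     if n != len(truth) or n < 8:
--         return False
--     q = n // 4
--     bad = [i for i in range(n) if pred[i] != truth[i]]
--     start_bad = 0
--     while start_bad < len(bad) and bad[start_bad] < q:
--         start_bad += 1
--     end_bad = 0
--     while end_bad < len(bad) and bad[len(bad) - 1 - end_bad] >= n - q:
--         end_bad += 1
--     mid_bad = len(bad) - start_bad - end_bad
--     return (10 * start_bad < 3 * q
--             and 10 * end_bad < 3 * q
--             and 10 * mid_bad > 6 * (n - 2 * q))
-- ===== Notes on version B (the rewrite author's own statement) =====
-- stated objective: alternative
-- what changed: Instead of A's three slice-zip accuracy sums with float thresholds, B builds the sorted list of mismatch positions once, reads the start/end zone error counts off it as an early-exit prefix and suffix scan (middle errors are the remainder), and tests exact integer error budgets (acc>0.7 over k items <=> 10*errors<3*k; acc<0.4 over d items <=> 10*errors>6*d).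
import Mathlib
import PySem

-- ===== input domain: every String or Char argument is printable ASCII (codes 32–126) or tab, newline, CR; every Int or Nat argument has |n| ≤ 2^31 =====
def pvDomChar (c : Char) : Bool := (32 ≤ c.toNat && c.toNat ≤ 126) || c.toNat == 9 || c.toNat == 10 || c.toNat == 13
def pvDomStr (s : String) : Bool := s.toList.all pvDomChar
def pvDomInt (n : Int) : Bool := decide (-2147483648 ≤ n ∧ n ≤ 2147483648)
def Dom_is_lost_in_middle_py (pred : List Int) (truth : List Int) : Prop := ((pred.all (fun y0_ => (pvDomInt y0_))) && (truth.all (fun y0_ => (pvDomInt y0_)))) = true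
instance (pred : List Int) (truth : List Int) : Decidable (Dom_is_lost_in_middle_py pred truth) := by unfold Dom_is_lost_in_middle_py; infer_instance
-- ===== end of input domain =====

-- B replaces A's three per-zone slice accuracies by one sorted list of mismatch POSITIONS whose
-- prefix/suffix give the zone error counts, tested against exact integer error budgets
-- (objective: alternative, same O(n) cost).

-- ===== PORT A =====
-- sum(p == t for p, t in zip(xs, ys)) : sum of a generator of bools (0/1 ints)
def pvMatchSum (l : List (Int × Int)) : Int :=
  (l.map (fun pt => if pt.1 = pt.2 then (1 : Int) else 0)).sum

-- Port of A. The float comparisons `s/q > 0.7`, `m/d < 0.4` are transcribed as the integer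
-- comparisons `10*s > 7*q`, `10*m < 4*d`: exact here, since with 0 < q ≤ 2^62 a ratio s/q can
-- never fall in the sub-ulp gap between the doubles round(0.7)/round(0.4) and the rationals
-- 7/10, 4/10, so CPython's double comparison and the rational one agree.
def is_lost_in_middle_py (pred : List Int) (truth : List Int) : Bool :=
  if pred.length ≠ truth.length ∨ pred.length < 8 then false
  else
    let quarter : Int := PySem.Int.floordiv (pred.length : Int) 4
    let startSum : Int := pvMatchSum
      (List.zip (PySem.List.slice pred none (some quarter))
                (PySem.List.slice truth none (some quarter)))
    let endSum : Int := pvMatchSum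
      (List.zip (PySem.List.slice pred (some (-quarter)) none)
                (PySem.List.slice truth (some (-quarter)) none))
    let midSum : Int := pvMatchSum
      (List.zip (PySem.List.slice pred (some quarter) (some (-quarter)))
                (PySem.List.slice truth (some quarter) (some (-quarter))))
    decide (10 * startSum > 7 * quarter ∧ 10 * endSum > 7 * quarter ∧
            10 * midSum < 4 * ((pred.length : Int) - 2 * quarter))

-- ===== PORT B =====
-- Source B's first while loop: length of the prefix of `bad` whose entries are < q
def pvPrefixLT (q : Int) : List Int → Int
  | [] => 0
  | x :: r => if x < q then pvPrefixLT q r + 1 else 0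

-- Source B's second while loop walks `bad` from its last element backwards; it is the same
-- early-exit scan over `bad.reverse`, counting while the entry is ≥ the bound
def pvPrefixGE (b : Int) : List Int → Int
  | [] => 0
  | x :: r => if b ≤ x then pvPrefixGE b r + 1 else 0

def is_lost_in_middle_py_alt (pred : List Int) (truth : List Int) : Bool :=
  if pred.length ≠ truth.length ∨ pred.length < 8 then false
  else
    let n : Int := (pred.length : Int)
    let q : Int := PySem.Int.floordiv n 4
    -- bad = [i for i in range(n) if pred[i] != truth[i]]  (indices are in range, so getD is exact)
    let bad : List Int := (PySem.List.pyRange 0 n 1).filter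
      (fun i => decide (PySem.List.pyGetD pred i 0 ≠ PySem.List.pyGetD truth i 0))
    let startBad : Int := pvPrefixLT q bad
    let endBad : Int := pvPrefixGE (n - q) bad.reverse
    let midBad : Int := (bad.length : Int) - startBad - endBad
    decide (10 * startBad < 3 * q ∧ 10 * endBad < 3 * q ∧
            10 * midBad > 6 * (n - 2 * q))

-- ===== PRECONDITION & SPEC =====
def Spec_is_lost_in_middle_py (pred : List Int) (truth : List Int) (out : Bool) : Prop := out = is_lost_in_middle_py_alt pred truth
instance (pred : List Int) (truth : List Int) (out : Bool) : Decidable (Spec_is_lost_in_middle_py pred truth out) := by unfold Spec_is_lost_in_middle_py; infer_instance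

-- ===== CLAIM (what is proved, stated in full; the proofs are below) =====
def Claim_equal_is_lost_in_middle_py : Prop := ∀ (pred : List Int) (truth : List Int), Dom_is_lost_in_middle_py pred truth → Spec_is_lost_in_middle_py pred truth (is_lost_in_middle_py pred truth)

-- ===== LEMMAS AND PROOFS =====

theorem pvZipTake (a b : List Int) (k : Nat) :
    List.zip (a.take k) (b.take k) = (List.zip a b).take k := by
  induction a generalizing b k with
  | nil => simp
  | cons x xs ih =>
    cases b with
    | nil => simp
    | cons y ys =>
      cases k with
      | zero => simp
      | succ k => simp [List.zip_cons_cons, ih]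

theorem pvZipDrop (a b : List Int) (k : Nat) :
    List.zip (a.drop k) (b.drop k) = (List.zip a b).drop k := by
  induction a generalizing b k with
  | nil => simp
  | cons x xs ih =>
    cases b with
    | nil => simp
    | cons y ys =>
      cases k with
      | zero => simp
      | succ k => simp [List.zip_cons_cons, ih]

-- on an ascending list, Source B's early-exit prefix scan counts ALL elements below the bound
theorem pvPrefixLT_sorted (q : Int) (l : List Int) (h : l.Pairwise (· ≤ ·)) :
    pvPrefixLT q l = (l.countP (fun x => decide (x < q)) : Int) := by
  induction l with
  | nil => simp [pvPrefixLT]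
  | cons x r ih =>
    rcases List.pairwise_cons.mp h with ⟨hx, hr⟩
    by_cases hxq : x < q
    · simp [pvPrefixLT, hxq, ih hr]
    · have : r.countP (fun x => decide (x < q)) = 0 := by
        rw [List.countP_eq_zero]
        intro a ha
        simp only [decide_eq_true_eq]
        exact not_lt.mpr (le_trans (not_lt.mp hxq) (hx a ha))
      simp [pvPrefixLT, hxq, this]

-- on a descending list, the backwards scan counts ALL elements at or above the bound
theorem pvPrefixGE_sorted (b : Int) (l : List Int) (h : l.Pairwise (fun a c => c ≤ a)) :
    pvPrefixGE b l = (l.countP (fun x => decide (b ≤ x)) : Int) := by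
  induction l with
  | nil => simp [pvPrefixGE]
  | cons x r ih =>
    rcases List.pairwise_cons.mp h with ⟨hx, hr⟩
    by_cases hxb : b ≤ x
    · simp [pvPrefixGE, hxb, ih hr]
    · have : r.countP (fun x => decide (b ≤ x)) = 0 := by
        rw [List.countP_eq_zero]
        intro a ha
        simp only [decide_eq_true_eq]
        exact fun hba => hxb (le_trans hba (hx a ha))
      simp [pvPrefixGE, hxb, this]

-- the mismatch count over an index segment is the mismatch count of the zip segment
theorem pvCountRange' (pred truth : List Int) (a len : Nat)
    (h : a + len ≤ (List.zip pred truth).length) :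
    (List.range' a len).countP (fun i => decide (pred.getD i 0 ≠ truth.getD i 0))
      = (((List.zip pred truth).drop a).take len).countP (fun pt => decide (pt.1 ≠ pt.2)) := by
  induction len generalizing a with
  | zero => simp
  | succ len ih =>
    have ha : a < (List.zip pred truth).length := by omega
    have hap : a < pred.length := by simp [List.length_zip] at ha; omega
    have hat : a < truth.length := by simp [List.length_zip] at ha; omega
    rw [List.range'_succ, List.drop_eq_getElem_cons ha]
    simp only [List.countP_cons, List.take_succ_cons]
    rw [ih (a + 1) (by omega)]
    have hz : (List.zip pred truth)[a] = (pred[a], truth[a]) := List.getElem_zip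
    have h1 : pred.getD a 0 = pred[a] := List.getD_eq_getElem pred 0 hap
    have h2 : truth.getD a 0 = truth[a] := List.getD_eq_getElem truth 0 hat
    rw [hz, h1, h2]

-- split of an initial Nat range at an interior point
theorem pvRangeSplit (a b : Nat) : List.range' 0 (a + b) = List.range' 0 a ++ List.range' a b := by
  simpa using (List.range'_append_1 (s := 0) (m := a) (n := b)).symm

-- ===== VERDICT (by name: the statement is the Claim_ definition above) =====
theorem is_lost_in_middle_py_spec : Claim_equal_is_lost_in_middle_py := by
  intro pred truth _
  unfold Spec_is_lost_in_middle_py is_lost_in_middle_py is_lost_in_middle_py_alt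
  by_cases hguard : pred.length ≠ truth.length ∨ pred.length < 8
  · simp only [if_pos hguard]
  · simp only [if_neg hguard]
    push Not at hguard
    obtain ⟨hlen, hn8⟩ := hguard
    set n : Nat := pred.length with hn
    have hzlen : (List.zip pred truth).length = n := by
      simp [List.length_zip, ← hlen, ← hn]
    set q : Nat := n / 4 with hqdef
    have hq2 : 2 ≤ q := by omega
    have hq2n : 2 * q ≤ n := by omega
    have hquarter : PySem.Int.floordiv (n : Int) 4 = (q : Int) := by
      exact_mod_cast PySem.Int.floordiv_natCast n 4
    -- the mismatch predicate on indices (Nat form)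
    set m : Nat → Bool := fun i => decide (pred.getD i 0 ≠ truth.getD i 0) with hm
    -- ----- B side -----
    -- `bad` as the Int image of the filtered Nat range
    have hbad : (PySem.List.pyRange 0 (n : Int) 1).filter
        (fun i => decide (PySem.List.pyGetD pred i 0 ≠ PySem.List.pyGetD truth i 0))
        = ((List.range n).filter m).map (fun k => ((k : Nat) : Int)) := by
      rw [PySem.List.pyRange_zero_nat, List.filter_map]
      have hp : ((fun i => decide (PySem.List.pyGetD pred i 0 ≠ PySem.List.pyGetD truth i 0))
          ∘ (fun k : Nat => ((k : Nat) : Int))) = m := by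
        funext i
        simp [hm, Function.comp]
      rw [hp]
    set badN : List Nat := (List.range n).filter m with hbadN
    have hsortN : badN.Pairwise (· < ·) := List.Pairwise.filter m List.pairwise_lt_range
    have hsortI : (badN.map (fun k => ((k : Nat) : Int))).Pairwise ((· ≤ ·) : Int → Int → Prop) :=
      List.pairwise_map.mpr (hsortN.imp (fun hab => by exact_mod_cast le_of_lt hab))
    have hsortR : ((badN.map (fun k => ((k : Nat) : Int))).reverse).Pairwise (fun a c => c ≤ a) :=
      List.pairwise_reverse.mpr hsortI
    -- prefix scans → countP over badN
    have hsb : pvPrefixLT (q : Int) (badN.map (fun k => ((k : Nat) : Int)))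
        = (badN.countP (fun i => decide (i < q)) : Int) := by
      rw [pvPrefixLT_sorted _ _ hsortI, List.countP_map]
      congr 1
      apply List.countP_congr
      intro a _
      simp [Function.comp]
    have heb : pvPrefixGE ((n : Int) - (q : Int)) (badN.map (fun k => ((k : Nat) : Int))).reverse
        = (badN.countP (fun i => decide (n - q ≤ i)) : Int) := by
      rw [pvPrefixGE_sorted _ _ hsortR, List.countP_reverse, List.countP_map]
      congr 1
      apply List.countP_congr
      intro a _
      simp [Function.comp]
      omega
    -- countP over the filtered range → mismatch counts of zip segments
    set z : List (Int × Int) := List.zip pred truth with hz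
    set mc : List (Int × Int) → Nat := fun l => l.countP (fun pt => decide (pt.1 ≠ pt.2)) with hmc
    have hrange : List.range n = List.range' 0 (n - q) ++ List.range' (n - q) q := by
      rw [List.range_eq_range']
      conv_lhs => rw [show n = (n - q) + q from by omega]
      exact pvRangeSplit (n - q) q
    have hrange2 : List.range' 0 (n - q) = List.range' 0 q ++ List.range' q (n - q - q) := by
      conv_lhs => rw [show n - q = q + (n - q - q) from by omega]
      exact pvRangeSplit q (n - q - q)
    have hstartN : badN.countP (fun i => decide (i < q)) = mc (z.take q) := by
      rw [hbadN, List.countP_filter, hrange, hrange2]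
      simp only [List.countP_append]
      have c1 : (List.range' 0 q).countP (fun a => decide (a < q) && m a)
          = (List.range' 0 q).countP m := by
        apply List.countP_congr
        intro a ha
        have := List.mem_range'_1.mp ha
        simp [show a < q by omega]
      have c2 : (List.range' q (n - q - q)).countP (fun a => decide (a < q) && m a) = 0 := by
        rw [List.countP_eq_zero]
        intro a ha
        have := List.mem_range'_1.mp ha
        simp [show ¬ a < q by omega]
      have c3 : (List.range' (n - q) q).countP (fun a => decide (a < q) && m a) = 0 := by
        rw [List.countP_eq_zero]
        intro a ha
        have := List.mem_range'_1.mp ha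
        simp [show ¬ a < q by omega]
      rw [c1, c2, c3]
      have h0 := pvCountRange' pred truth 0 q (by rw [← hz, hzlen]; omega)
      simpa [hmc, hm, ← hz] using h0
    have hendN : badN.countP (fun i => decide (n - q ≤ i)) = mc (z.drop (n - q)) := by
      rw [hbadN, List.countP_filter, hrange]
      simp only [List.countP_append]
      have c1 : (List.range' 0 (n - q)).countP (fun a => decide (n - q ≤ a) && m a) = 0 := by
        rw [List.countP_eq_zero]
        intro a ha
        have := List.mem_range'_1.mp ha
        simp [show ¬ n - q ≤ a by omega]
      have c2 : (List.range' (n - q) q).countP (fun a => decide (n - q ≤ a) && m a)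
          = (List.range' (n - q) q).countP m := by
        apply List.countP_congr
        intro a ha
        have := List.mem_range'_1.mp ha
        simp [show n - q ≤ a by omega]
      rw [c1, c2]
      have h0 := pvCountRange' pred truth (n - q) q (by rw [← hz, hzlen]; omega)
      have hdt : (z.drop (n - q)).take q = z.drop (n - q) := by
        apply List.take_of_length_le
        rw [List.length_drop, hzlen]
        omega
      rw [← hz] at h0
      rw [hdt] at h0
      simpa [hmc, hm, ← hz] using h0
    have htotN : badN.length = mc z := by
      have h1 : badN.length = (List.range n).countP m := by
        rw [hbadN, ← List.countP_eq_length_filter]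
      have h0 := pvCountRange' pred truth 0 n (by rw [← hz, hzlen]; omega)
      rw [← hz] at h0
      have hzt : z.take n = z := List.take_of_length_le (by rw [hzlen])
      rw [List.drop_zero, hzt] at h0
      rw [h1, List.range_eq_range']
      simpa [hmc, hm, ← hz] using h0
    -- ----- A side: slices → zip segments -----
    have hsliceTo : ∀ xs : List Int, PySem.List.slice xs none (some (q : Int)) = xs.take q :=
      fun xs => PySem.List.slice_to_natCast xs q
    have hsliceFrom : ∀ xs : List Int, xs.length = n →
        PySem.List.slice xs (some (-(q : Int))) none = xs.drop (n - q) := by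
      intro xs hx
      rw [PySem.List.slice_from_neg_natCast xs q (by omega), hx]
    have hclampPos : PySem.List.clampIdx n (q : Int) = q := by
      rw [PySem.List.clampIdx_natCast]; omega
    have hclampNeg : PySem.List.clampIdx n (-(q : Int)) = n - q :=
      PySem.List.clampIdx_neg_natCast n q (by omega)
    have hsliceMid : ∀ xs : List Int, xs.length = n →
        PySem.List.slice xs (some (q : Int)) (some (-(q : Int)))
          = (xs.drop q).take (n - 2 * q) := by
      intro xs hx
      simp only [PySem.List.slice, hx, hclampPos, hclampNeg]
      congr 1
      omega
    rw [hquarter, hbad]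
    rw [hsliceTo pred, hsliceTo truth,
        hsliceFrom pred hn.symm, hsliceFrom truth (by omega),
        hsliceMid pred hn.symm, hsliceMid truth (by omega)]
    rw [pvZipTake, pvZipDrop, pvZipTake, pvZipDrop]
    rw [← hz, hsb, heb, hstartN, hendN, List.length_map, htotN]
    -- match counts + mismatch counts = segment lengths
    have hsum : ∀ l : List (Int × Int),
        pvMatchSum l + (mc l : Int) = (l.length : Int) := by
      intro l
      induction l with
      | nil => simp [pvMatchSum, hmc]
      | cons pt r ih =>
        by_cases h : pt.1 = pt.2 <;>
          simp [pvMatchSum, hmc, h] at ih ⊢ <;> omega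
    have hlen1 : (z.take q).length = q := by simp [hzlen]; omega
    have hlen2 : ((z.drop q).take (n - 2 * q)).length = n - 2 * q := by simp [hzlen]; omega
    have hlen3 : (z.drop (n - q)).length = q := by simp [hzlen]; omega
    have hmidsplit : mc z = mc (z.take q) + mc ((z.drop q).take (n - 2 * q)) + mc (z.drop (n - q)) := by
      have hdecomp : z = z.take q ++ ((z.drop q).take (n - 2 * q) ++ z.drop (n - q)) := by
        conv_lhs => rw [← List.take_append_drop q z]
        congr 1
        conv_lhs => rw [← List.take_append_drop (n - 2 * q) (z.drop q)]
        congr 1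
        rw [List.drop_drop]
        congr 1
        omega
      conv_lhs => rw [hdecomp]
      simp only [hmc, List.countP_append]
      omega
    have e1 := hsum (z.take q)
    have e2 := hsum ((z.drop q).take (n - 2 * q))
    have e3 := hsum (z.drop (n - q))
    rw [hlen1] at e1
    rw [hlen2] at e2
    rw [hlen3] at e3
    simp only [decide_eq_decide]
    omega
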